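-- pv_equiv track=rewrite | github.com/elliottwu/MagicPony | magicpony/geometry/skinning.py | build_kinematic_chain
-- ===== SOURCE A (Python) =====
-- def build_kinematic_chain(n_bones, start_bone_idx):
--     # build bones and kinematic chain starting from leaf bone (body joint)
--     bones_to_joints = []
--     kinematic_chain = []
--     bone_idx = start_bone_idx
--     # bones from leaf to root
--     dependent_bones = []
--     for i in range(n_bones):
--         bones_to_joints += [(i + 1, i)]
--         kinematic_chain = [(bone_idx, dependent_bones)] + kinematic_chain  # parent is always in the front
--         dependent_bones = dependent_bones + [bone_idx]
--         bone_idx += 1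
--     return bones_to_joints, kinematic_chain, dependent_bones
-- ===== SOURCE B (Python) =====
-- def build_kinematic_chain(n_bones, start_bone_idx):
--     # Index-based construction: no running accumulator; each dependent list is
--     # a prefix slice of the full bone-index list, taken per chain position.
--     bones_to_joints = [(i + 1, i) for i in range(n_bones)]
--     dependent_bones = list(range(start_bone_idx, start_bone_idx + n_bones))
--     kinematic_chain = [(dependent_bones[k], dependent_bones[:k])
--                        for k in range(n_bones - 1, -1, -1)]
--     return bones_to_joints, kinematic_chain, dependent_bones
-- ===== Notes on version B (the rewrite author's own statement) =====
-- stated objective: alternative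
-- what changed: Drops A's running accumulators: B builds the full bone-index list once and constructs each chain entry directly from indices, taking each dependent list as a prefix slice of that list, iterating positions in reverse.
import Mathlib
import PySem

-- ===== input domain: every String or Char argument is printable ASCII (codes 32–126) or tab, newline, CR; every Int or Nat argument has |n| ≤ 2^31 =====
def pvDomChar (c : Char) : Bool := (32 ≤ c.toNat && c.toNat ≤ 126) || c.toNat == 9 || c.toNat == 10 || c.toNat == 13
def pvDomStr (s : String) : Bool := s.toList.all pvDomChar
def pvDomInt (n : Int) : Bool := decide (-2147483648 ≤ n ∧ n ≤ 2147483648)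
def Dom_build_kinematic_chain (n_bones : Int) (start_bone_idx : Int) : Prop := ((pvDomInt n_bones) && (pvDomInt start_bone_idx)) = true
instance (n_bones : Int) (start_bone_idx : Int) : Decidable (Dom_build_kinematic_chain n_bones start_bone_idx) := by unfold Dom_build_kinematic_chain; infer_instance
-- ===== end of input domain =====

-- B rebuilds each chain entry and its dependent-bone list directly from range
-- indices instead of A's running accumulators (objective: alternative).

-- ===== PORT A =====
-- the loop body of A, acting on the state (bones_to_joints, kinematic_chain, bone_idx, dependent_bones)
def pvStepA (s : (List (Int × Int)) × (List (Int × List Int)) × Int × List Int) (i : Int) :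
    (List (Int × Int)) × (List (Int × List Int)) × Int × List Int :=
  (s.1 ++ [(i + 1, i)], (s.2.2.1, s.2.2.2) :: s.2.1, s.2.2.1 + 1, s.2.2.2 ++ [s.2.2.1])

def build_kinematic_chain (n_bones : Int) (start_bone_idx : Int) :
    (List (Int × Int)) × (List (Int × List Int)) × List Int :=
  let fin := (PySem.List.pyRange 0 n_bones 1).foldl pvStepA ([], [], start_bone_idx, [])
  (fin.1, fin.2.1, fin.2.2.2)

-- ===== PORT B =====
-- dependent_bones[k] is always in range (0 ≤ k < len), so xs[k] is ported with pyGetD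
def build_kinematic_chain_alt (n_bones : Int) (start_bone_idx : Int) :
    (List (Int × Int)) × (List (Int × List Int)) × List Int :=
  let bones_to_joints := (PySem.List.pyRange 0 n_bones 1).map (fun i => (i + 1, i))
  let dependent_bones := PySem.List.pyRange start_bone_idx (start_bone_idx + n_bones) 1
  let kinematic_chain := (PySem.List.pyRange (n_bones - 1) (-1) (-1)).map
    (fun k => (PySem.List.pyGetD dependent_bones k 0, PySem.List.slice dependent_bones none (some k)))
  (bones_to_joints, kinematic_chain, dependent_bones)

-- ===== PRECONDITION & SPEC =====
def Spec_build_kinematic_chain (n_bones : Int) (start_bone_idx : Int) (out : (List (Int × Int)) × (List (Int × List Int)) × List Int) : Prop := out = build_kinematic_chain_alt n_bones start_bone_idx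
instance (n_bones : Int) (start_bone_idx : Int) (out : (List (Int × Int)) × (List (Int × List Int)) × List Int) : Decidable (Spec_build_kinematic_chain n_bones start_bone_idx out) := by unfold Spec_build_kinematic_chain; infer_instance

-- ===== CLAIM (what is proved, stated in full; the proofs are below) =====
def Claim_equal_build_kinematic_chain : Prop := ∀ (n_bones : Int) (start_bone_idx : Int), Dom_build_kinematic_chain n_bones start_bone_idx → Spec_build_kinematic_chain n_bones start_bone_idx (build_kinematic_chain n_bones start_bone_idx)

-- ===== LEMMAS AND PROOFS =====

-- closed forms of the three components, used as the meeting point of both proofs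
def pvDep (s : Int) (k : Nat) : List Int := (List.range k).map (fun j : Nat => s + (j : Int))
def pvChain (s : Int) (m : Nat) : List (Int × List Int) :=
  (List.range m).reverse.map (fun k : Nat => (s + (k : Int), pvDep s k))
def pvBtj (m : Nat) : List (Int × Int) := (List.range m).map (fun i : Nat => ((i : Int) + 1, (i : Int)))
def pvIdx (m : Nat) : List Int := (List.range m).map (fun k : Nat => (k : Int))

theorem pvDep_succ (s : Int) (m : Nat) : pvDep s (m + 1) = pvDep s m ++ [s + (m : Int)] := by
  simp [pvDep, List.range_succ]

-- closed form of A's fold over the first m loop iterations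
theorem pvFoldA_closed (m : Nat) (s : Int) :
    (pvIdx m).foldl pvStepA ([], [], s, []) = (pvBtj m, pvChain s m, s + m, pvDep s m) := by
  induction m with
  | zero => simp [pvIdx, pvBtj, pvChain, pvDep]
  | succ m ih =>
    have hidx : pvIdx (m + 1) = pvIdx m ++ [(m : Int)] := by simp [pvIdx, List.range_succ]
    rw [hidx, List.foldl_append, ih]
    simp only [List.foldl_cons, List.foldl_nil, pvStepA]
    refine Prod.ext ?_ (Prod.ext ?_ (Prod.ext ?_ ?_))
    · simp [pvBtj, List.range_succ]
    · simp [pvChain, List.range_succ]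
    · push_cast; ring
    · exact (pvDep_succ s m).symm

theorem pvRangeCast (n : Int) : PySem.List.pyRange 0 n 1 = pvIdx n.toNat := by
  rw [PySem.List.pyRange_one, pvIdx]
  simp

-- B's countdown chain of slices equals the reversed-range closed form
theorem pvChainB (m : Nat) (s : Int) :
    (PySem.List.pyRange ((m : Int) - 1) (-1) (-1)).map
      (fun k => (PySem.List.pyGetD (pvDep s m) k 0, PySem.List.slice (pvDep s m) none (some k))) =
      pvChain s m := by
  apply List.ext_getElem
  · simp [pvChain, PySem.List.length_pyRange_neg_one]
  · intro i h1 h2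
    have hi : i < m := by
      simpa [pvChain] using h2
    have hk : ∀ (hlen : i < (PySem.List.pyRange ((m : Int) - 1) (-1) (-1)).length),
        (PySem.List.pyRange ((m : Int) - 1) (-1) (-1))[i]'hlen = ((m - 1 - i : Nat) : Int) := by
      intro hlen
      simp only [PySem.List.pyRange_neg_one, List.getElem_map, List.getElem_range]
      omega
    simp only [List.getElem_map, hk, pvChain, List.getElem_reverse, List.getElem_range,
      List.length_range]
    set t : Nat := m - 1 - i with ht
    have htm : t < m := by omega
    refine Prod.ext ?_ ?_
    · rw [PySem.List.pyGetD_natCast]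
      simp [pvDep, List.getD, htm]
    · rw [PySem.List.slice_to_natCast]
      simp only [pvDep, ← List.map_take, List.take_range]
      rw [Nat.min_eq_left htm.le]

-- ===== VERDICT (by name: the statement is the Claim_ definition above) =====
theorem build_kinematic_chain_spec : Claim_equal_build_kinematic_chain := by
  intro n s _
  unfold Spec_build_kinematic_chain build_kinematic_chain build_kinematic_chain_alt
  rw [pvRangeCast n, pvFoldA_closed n.toNat s]
  refine Prod.ext ?_ (Prod.ext ?_ ?_)
  · simp only []
    simp [pvBtj, pvIdx, List.map_map]
  · simp only []
    by_cases h : n ≤ 0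
    · rw [PySem.List.pyRange_neg_one_eq_nil (by omega)]
      simp [pvChain, Int.toNat_of_nonpos h]
    · have hcast : ((n.toNat : Int)) = n := Int.toNat_of_nonneg (by omega)
      have hdep : PySem.List.pyRange s (s + n) 1 = pvDep s n.toNat := by
        rw [PySem.List.pyRange_one, pvDep]
        have h4 : s + n - s = n := by ring
        rw [h4]
      have hb := pvChainB n.toNat s
      rw [hcast, ← hdep] at hb
      exact hb.symm
  · simp only []
    rw [PySem.List.pyRange_one, pvDep]
    have h4 : s + n - s = n := by ring
    rw [h4]
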